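-- pv_equiv track=rewrite | github.com/SimplySaid/leetcode | problem1402 - ReducingDishes.py | reducing_dishes
-- ===== SOURCE A (Python) =====
-- def reducing_dishes(satisfaction):
--     satisfaction.sort()
--     results = 0
--     negative = []
--     increment = 0
--
--     for i in range(len(satisfaction)-1, -1, -1):
--         if satisfaction[i] < 0:
--             negative.insert(0, satisfaction.pop(i))
--         else:
--             increment += satisfaction[i]
--
--     for i in range(0, len(satisfaction)):
--         if satisfaction[i] >= 0:
--             results += (i+1) * satisfaction[i]
--
--     multiplier = 1
--     for i in range(0, len(negative)):
--         if abs(multiplier * negative[i]) < increment: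
--             results += increment + multiplier * negative[i]
--             multiplier +=1
--
--     return results
-- ===== SOURCE B (Python) =====
-- def reducing_dishes(satisfaction):
--     s = sorted(satisfaction, reverse=True)
--     total = 0
--     res = 0
--     k = 0
--     for v in s:
--         if v < 0:
--             break
--         total += v
--         res += total
--         k += 1
--     m = 1
--     for v in reversed(s[k:]):
--         if m * v + total > 0:
--             res += total + m * v
--             m += 1
--     return res
-- ===== Notes on version B (the rewrite author's own statement) =====
-- stated objective: faster
-- what changed: B sorts once in DESCENDING order and replaces A's quadratic pop(i)/insert(0) partition and index-weighted sum by one streaming scan that keeps a running prefix total and adds it each step (no index multipliers), then runs the negatives heuristic over the reversed tail with the condition rewritten as m*v + total > 0.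
import Mathlib
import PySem

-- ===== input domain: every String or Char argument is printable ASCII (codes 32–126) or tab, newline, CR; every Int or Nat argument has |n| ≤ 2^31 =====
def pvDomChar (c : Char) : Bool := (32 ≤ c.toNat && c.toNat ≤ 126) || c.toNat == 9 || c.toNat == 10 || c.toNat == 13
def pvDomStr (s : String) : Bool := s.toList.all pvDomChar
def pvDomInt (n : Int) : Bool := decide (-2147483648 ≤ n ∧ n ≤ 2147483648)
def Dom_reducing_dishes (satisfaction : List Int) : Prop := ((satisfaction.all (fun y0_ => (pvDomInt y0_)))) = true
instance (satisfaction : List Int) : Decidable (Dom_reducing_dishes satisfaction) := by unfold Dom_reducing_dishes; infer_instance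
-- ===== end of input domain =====

-- B sorts once in descending order and uses a streaming running-total scan (objective: faster,
-- avoiding A's quadratic pop(i)/insert(0)); A sorts/pops its argument in place, B does not —
-- the equivalence proved here is about the return value only.

-- ===== PORT A =====
-- loop 1 body: pops negatives (collecting them in front of `negative`), accumulates nonnegatives into increment
def pvLoop1A (st : List Int × List Int × Int) (i : Int) : List Int × List Int × Int :=
  match PySem.List.pyGet? st.1 i with
  | none => st      -- IndexError: unreachable for the indices the loop generates
  | some v =>
    if v < 0 then
      match PySem.List.pop? st.1 i with
      | none => st  -- unreachable (same index as the successful pyGet?)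
      | some (x, sat') => (sat', x :: st.2.1, st.2.2)
    else (st.1, st.2.1, st.2.2 + v)

def reducing_dishes (satisfaction : List Int) : Int :=
  let s0 := PySem.List.sorted satisfaction (fun x => x) false
  let st := (PySem.List.pyRange ((s0.length : Int) - 1) (-1) (-1)).foldl pvLoop1A (s0, [], 0)
  let sat := st.1
  let negative := st.2.1
  let increment := st.2.2
  let results := (PySem.List.pyRange 0 (sat.length : Int) 1).foldl
    (fun (r : Int) i =>
      match PySem.List.pyGet? sat i with
      | none => r
      | some v => if v ≥ 0 then r + (i + 1) * v else r) (0 : Int)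
  let fin := (PySem.List.pyRange 0 (negative.length : Int) 1).foldl
    (fun (p : Int × Int) i =>
      match PySem.List.pyGet? negative i with
      | none => p
      | some v => if |p.2 * v| < increment then (p.1 + increment + p.2 * v, p.2 + 1) else p)
    (results, 1)
  fin.1

-- ===== PORT B =====
-- the for-with-break over the descending list: returns (total, res, k)
def pvPosScanB : List Int → Int → Int → Nat → Int × Int × Nat
  | [], total, res, k => (total, res, k)
  | v :: rest, total, res, k =>
    if v < 0 then (total, res, k)
    else pvPosScanB rest (total + v) (res + (total + v)) (k + 1)

def reducing_dishes_alt (satisfaction : List Int) : Int :=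
  let s := PySem.List.sorted satisfaction (fun x => x) true
  let st := pvPosScanB s 0 0 0
  let total := st.1
  let res := st.2.1
  let k := st.2.2
  -- s[k:] with 0 ≤ k (a count of consumed elements) is List.drop k; reversed(·) is .reverse
  let fin := ((s.drop k).reverse).foldl
    (fun (p : Int × Int) v =>
      if p.2 * v + total > 0 then (p.1 + total + p.2 * v, p.2 + 1) else p)
    (res, 1)
  fin.1

-- ===== PRECONDITION & SPEC =====
def Spec_reducing_dishes (satisfaction : List Int) (out : Int) : Prop := out = reducing_dishes_alt satisfaction
instance (satisfaction : List Int) (out : Int) : Decidable (Spec_reducing_dishes satisfaction out) := by unfold Spec_reducing_dishes; infer_instance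

-- ===== CLAIM (what is proved, stated in full; the proofs are below) =====
def Claim_equal_reducing_dishes : Prop := ∀ (satisfaction : List Int), Dom_reducing_dishes satisfaction → Spec_reducing_dishes satisfaction (reducing_dishes satisfaction)

-- ===== LEMMAS AND PROOFS =====

theorem pvEraseIdx_middle {α : Type} (q k : List α) (x : α) :
    (q ++ x :: k).eraseIdx q.length = q ++ k := by
  induction q with
  | nil => simp
  | cons a q ih => simpa using ih

-- A's first loop, run over any unprocessed prefix p with already-kept suffix k, partitions p:
-- kept nonnegatives stay in place, popped negatives are prepended, their order preserved.
theorem pvLoop1A_spec (p : List Int) : ∀ (k neg : List Int) (inc : Int),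
    (PySem.List.pyRange ((p.length : Int) - 1) (-1) (-1)).foldl pvLoop1A (p ++ k, neg, inc)
    = (p.filter (fun x => x ≥ 0) ++ k, p.filter (fun x => x < 0) ++ neg,
       inc + (p.filter (fun x => x ≥ 0)).sum) := by
  induction p using List.reverseRecOn with
  | nil =>
    intro k neg inc
    simp
  | append_singleton q x ih =>
    intro k neg inc
    have hlen : ((q ++ [x]).length : Int) - 1 = (q.length : Int) := by simp
    rw [hlen, PySem.List.pyRange_neg_one_cons (by omega : (-1:Int) < (q.length:Int))]
    rw [List.foldl_cons]
    have hget : PySem.List.pyGet? ((q ++ [x]) ++ k) ((q.length : Int)) = some x := by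
      rw [PySem.List.pyGet?_natCast, List.append_assoc,
        List.getElem?_append_right (le_refl _)]
      simp
    by_cases hx : x < 0
    · have hpop : PySem.List.pop? ((q ++ [x]) ++ k) ((q.length : Int)) = some (x, q ++ k) := by
        rw [PySem.List.pop?_natCast _ _ (by simp)]
        simp [List.getElem_append_right, pvEraseIdx_middle]
      simp only [pvLoop1A, hget, hpop, if_pos hx]
      rw [ih k (x :: neg) inc]
      simp [List.filter_append, hx, show ¬ x ≥ 0 by omega]
    · simp only [pvLoop1A, hget, if_neg hx]
      have := ih ([x] ++ k) neg (inc + x)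
      rw [List.append_assoc]
      rw [this]
      simp [List.filter_append, hx, show x ≥ 0 by omega]
      omega

-- A's second loop over the (all-nonnegative) kept list is the enumerate-weighted sum.
theorem pvLoop2_spec (full : List Int) : ∀ (t : List Int) (j : Nat) (acc : Int),
    full.drop j = t → (∀ x ∈ t, x ≥ 0) →
    (PySem.List.pyRange (j : Int) (full.length : Int) 1).foldl
      (fun (r : Int) i =>
        match PySem.List.pyGet? full i with
        | none => r
        | some v => if v ≥ 0 then r + (i + 1) * v else r) acc
    = acc + ((PySem.List.enumerate t (j : Int)).map (fun p => (p.1 + 1) * p.2)).sum := by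
  intro t
  induction t with
  | nil =>
    intro j acc hd _
    have hj : full.length ≤ j := List.drop_eq_nil_iff.mp hd
    rw [PySem.List.pyRange_one_eq_nil (by exact_mod_cast hj)]
    simp [PySem.List.enumerate]
  | cons v t ih =>
    intro j acc hd hnn
    have hj : j < full.length := by
      by_contra h
      rw [List.drop_eq_nil_of_le (by omega)] at hd
      simp at hd
    have hget : full[j]? = some v := by
      have : (full.drop j)[0]? = some v := by rw [hd]; rfl
      rw [List.getElem?_drop] at this
      simpa using this
    rw [PySem.List.pyRange_one_cons (by exact_mod_cast hj), List.foldl_cons]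
    simp only [PySem.List.pyGet?_natCast, hget, if_pos (hnn v (List.mem_cons_self ..))]
    have hd' : full.drop (j+1) = t := by
      rw [← List.tail_drop, hd]; rfl
    have := ih (j+1) (acc + ((j:Int) + 1) * v) hd' (fun x hx => hnn x (List.mem_cons_of_mem _ hx))
    rw [show ((j:Int) + 1) = ((j+1 : Nat) : Int) by push_cast; ring] at this ⊢
    rw [this]
    simp [PySem.List.enumerate]
    ring

theorem pvGet_some (xs : List Int) (i : Int) (h0 : 0 ≤ i) (h1 : i < (xs.length : Int)) :
    PySem.List.pyGet? xs i = some (PySem.List.pyGetD xs i 0) := by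
  lift i to Nat using h0
  rw [PySem.List.pyGet?_natCast, PySem.List.pyGetD_natCast,
    List.getElem?_eq_getElem (by exact_mod_cast h1),
    List.getD_eq_getElem _ _ (by exact_mod_cast h1)]

-- A's index-driven third loop as a direct fold over the negatives.
theorem pvLoop3_spec (neg : List Int) (increment : Int) (p : Int × Int) :
    (PySem.List.pyRange 0 (neg.length : Int) 1).foldl
      (fun (p : Int × Int) i =>
        match PySem.List.pyGet? neg i with
        | none => p
        | some v => if |p.2 * v| < increment then (p.1 + increment + p.2 * v, p.2 + 1) else p) p
    = neg.foldl
      (fun (p : Int × Int) v =>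
        if |p.2 * v| < increment then (p.1 + increment + p.2 * v, p.2 + 1) else p) p := by
  rw [PySem.List.foldl_congr_mem _ _
    (fun (p : Int × Int) i =>
      (fun (p : Int × Int) v =>
        if |p.2 * v| < increment then (p.1 + increment + p.2 * v, p.2 + 1) else p)
        p (PySem.List.pyGetD neg i 0)) p
    (by
      intro acc i hi
      rw [PySem.List.mem_pyRange_one] at hi
      simp only [pvGet_some neg i hi.1 hi.2])]
  have h := PySem.List.foldl_pyRange_zero_pyGetD neg 0
    (fun (p : Int × Int) v =>
      if |p.2 * v| < increment then (p.1 + increment + p.2 * v, p.2 + 1) else p) p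
  simpa using h

-- ---- B-side bridging ----

-- the enumerate-weighted sum A's second loop computes
def pvW (q : List Int) : Int := ((PySem.List.enumerate q 0).map (fun p => (p.1 + 1) * p.2)).sum

theorem pvW_append_singleton (l : List Int) (v : Int) :
    pvW (l ++ [v]) = pvW l + ((l.length : Int) + 1) * v := by
  simp [pvW, PySem.List.enumerate_append, PySem.List.enumerate_cons, PySem.List.enumerate_nil]

-- a sorted-ascending list is its negatives followed by its nonnegatives
theorem pvSplit (l : List Int) (h : l.Pairwise (fun a b => a ≤ b)) :
    l.filter (fun x => x < 0) ++ l.filter (fun x => x ≥ 0) = l := by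
  induction l with
  | nil => simp
  | cons a l ih =>
    rw [List.pairwise_cons] at h
    by_cases ha : a < 0
    · simp [List.filter_cons, ha, show ¬ a ≥ 0 by omega, ih h.2]
    · have hnil : l.filter (fun x => x < 0) = [] := by
        apply List.filter_eq_nil_iff.mpr
        intro x hx
        have := h.1 x hx
        simp only [decide_eq_true_eq]
        omega
      have hall : l.filter (fun x => x ≥ 0) = l := by
        apply List.filter_eq_self.mpr
        intro x hx
        have := h.1 x hx
        simp only [decide_eq_true_eq]
        omega
      simp [List.filter_cons, ha, show a ≥ 0 by omega, hnil, hall]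

-- sorting in reverse (identity key) is the reverse of sorting ascending
theorem pvSortedRev (xs : List Int) :
    PySem.List.sorted xs (fun x => x) true = (PySem.List.sorted xs (fun x => x) false).reverse := by
  refine List.eq_of_perm_of_sorted (le := fun a b : Int => b ≤ a)
    (fun a b _ _ h1 h2 => le_antisymm h2 h1)
    (PySem.List.sorted_pairwise_rev xs (fun x => x)) ?_
    ((PySem.List.sorted_perm xs (fun x => x) true).trans
      ((PySem.List.sorted_perm xs (fun x => x) false).symm.trans (List.reverse_perm _).symm))
  rw [List.pairwise_reverse]
  exact PySem.List.sorted_pairwise xs (fun x => x)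

-- the streaming scan consumes exactly the nonnegative prefix, producing its sum, the
-- enumerate-weighted sum of its reverse, and its length
theorem pvPosScanB_spec (p : List Int) : ∀ (r : List Int) (t0 r0 : Int) (k0 : Nat),
    (∀ x ∈ p, ¬ x < 0) → (∀ h, r.head? = some h → h < 0) →
    pvPosScanB (p ++ r) t0 r0 k0
      = (t0 + p.sum, r0 + (p.length : Int) * t0 + pvW p.reverse, k0 + p.length) := by
  induction p with
  | nil =>
    intro r t0 r0 k0 _ hr
    cases r with
    | nil => simp [pvPosScanB, pvW, PySem.List.enumerate]
    | cons h t =>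
      have := hr h rfl
      simp [pvPosScanB, this, pvW, PySem.List.enumerate]
  | cons v p ih =>
    intro r t0 r0 k0 hp hr
    have hv : ¬ v < 0 := hp v (List.mem_cons_self ..)
    simp only [List.cons_append, pvPosScanB, if_neg hv]
    rw [ih r (t0 + v) (r0 + (t0 + v)) (k0 + 1)
      (fun x hx => hp x (List.mem_cons_of_mem _ hx)) hr]
    rw [List.reverse_cons, pvW_append_singleton]
    refine Prod.ext (by simp; ring) (Prod.ext (by simp; push_cast; ring) (by simp; omega))

-- A's greedy condition |m*v| < inc coincides with B's m*v + inc > 0 along the fold,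
-- since every v is negative and the multiplier stays ≥ 1
theorem pvFold_eq (inc : Int) (neg : List Int) (h : ∀ v ∈ neg, v < 0) :
    ∀ (p : Int × Int), 1 ≤ p.2 →
    neg.foldl (fun (p : Int × Int) v =>
        if |p.2 * v| < inc then (p.1 + inc + p.2 * v, p.2 + 1) else p) p
    = neg.foldl (fun (p : Int × Int) v =>
        if p.2 * v + inc > 0 then (p.1 + inc + p.2 * v, p.2 + 1) else p) p := by
  induction neg with
  | nil => intro p _; rfl
  | cons v t ih =>
    intro p hp
    have hv : v < 0 := h v (List.mem_cons_self ..)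
    have hneg : p.2 * v < 0 := mul_neg_of_pos_of_neg (by omega) hv
    have ht := fun x hx => h x (List.mem_cons_of_mem _ hx)
    simp only [List.foldl_cons]
    by_cases hc : p.2 * v + inc > 0
    · rw [if_pos (by rw [abs_of_neg hneg]; omega), if_pos hc]
      exact ih ht _ (by simp; omega)
    · rw [if_neg (by rw [abs_of_neg hneg]; omega), if_neg hc]
      exact ih ht p hp

theorem pvMain (sat : List Int) : reducing_dishes sat = reducing_dishes_alt sat := by
  simp only [reducing_dishes, reducing_dishes_alt]
  set asc := PySem.List.sorted sat (fun x => x) false with hasc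
  set pos := asc.filter (fun x => x ≥ 0) with hpos
  set neg := asc.filter (fun x => x < 0) with hneg
  have h1 : (PySem.List.pyRange ((asc.length : Int) - 1) (-1) (-1)).foldl
      pvLoop1A (asc, ([] : List Int), (0 : Int)) = (pos, neg, pos.sum) := by
    simpa using pvLoop1A_spec asc [] [] 0
  rw [h1]
  have h2 := pvLoop2_spec pos pos 0 0 rfl
    (fun x hx => of_decide_eq_true (List.mem_filter.mp hx).2)
  simp only [Nat.cast_zero, zero_add] at h2
  rw [h2, pvLoop3_spec]
  -- B side
  have hsplit : neg ++ pos = asc :=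
    pvSplit asc (PySem.List.sorted_pairwise sat (fun x => x))
  have hs : PySem.List.sorted sat (fun x => x) true = pos.reverse ++ neg.reverse := by
    rw [pvSortedRev sat, ← hasc, ← hsplit, List.reverse_append]
  rw [hs]
  have hscan := pvPosScanB_spec pos.reverse neg.reverse 0 0 0
    (by
      intro x hx
      have := (List.mem_filter.mp (List.mem_reverse.mp hx)).2
      simp only [decide_eq_true_eq] at this
      omega)
    (by
      intro h hh
      have hm : h ∈ neg.reverse := List.mem_of_mem_head? hh
      have := (List.mem_filter.mp (List.mem_reverse.mp hm)).2
      simpa using this)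
  rw [hscan]
  simp only [List.reverse_reverse, List.sum_reverse, List.length_reverse,
    Nat.cast_ofNat, mul_zero, zero_add, add_zero]
  rw [List.drop_left' (by simp), List.reverse_reverse]
  have hnegall : ∀ v ∈ neg, v < 0 := by
    intro v hv
    have := (List.mem_filter.mp hv).2
    simpa using this
  exact congrArg Prod.fst (pvFold_eq pos.sum neg hnegall (pvW pos, 1) (by norm_num))

-- ===== VERDICT (by name: the statement is the Claim_ definition above) =====
theorem reducing_dishes_spec : Claim_equal_reducing_dishes := by
  intro satisfaction _
  exact pvMain satisfaction
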